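-- pv_equiv track=rewrite | github.com/gonpavlovsky/scraping-hotels-google-booking | hotels-google-booking/scripts/scraping_places_multiple.py | exclude_irrelevant_places
-- ===== SOURCE A (Python) =====
-- def exclude_irrelevant_places(results):
--     # Palabras clave que indican que un lugar es irrelevante
--     exclude_keywords = ['surf', 'school', 'lessons', 'shop', 'gym', 'restaurant', 'café', 'bar', 'studio']
--     filtered_results = []
--     for result in results:
--         name = result.get('name', '').lower()
--         if not any(keyword in name for keyword in exclude_keywords):
--             filtered_results.append(result)
--     return filtered_results
-- ===== SOURCE B (Python) =====
-- def exclude_irrelevant_places(results):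
--     # Keywords that indicate a place is irrelevant
--     exclude_keywords = ['surf', 'school', 'lessons', 'shop', 'gym', 'restaurant', 'café', 'bar', 'studio']
--
--     def has_keyword(name):
--         # one left-to-right scan of the name: at each position, does some keyword start here?
--         for i in range(len(name)):
--             if any(name[i:].startswith(kw) for kw in exclude_keywords):
--                 return True
--         return False
--
--     return [r for r in results if not has_keyword(r.get('name', '').lower())]
-- ===== Notes on version B (the rewrite author's own statement) =====
-- stated objective: alternative
-- what changed: Replaces per-keyword substring membership tests with a single positional scan of each name (at every position, test whether some keyword starts there, like one pass of a regex-alternation automaton) and builds the output as a comprehension filter instead of an append loop.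
import Mathlib
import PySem

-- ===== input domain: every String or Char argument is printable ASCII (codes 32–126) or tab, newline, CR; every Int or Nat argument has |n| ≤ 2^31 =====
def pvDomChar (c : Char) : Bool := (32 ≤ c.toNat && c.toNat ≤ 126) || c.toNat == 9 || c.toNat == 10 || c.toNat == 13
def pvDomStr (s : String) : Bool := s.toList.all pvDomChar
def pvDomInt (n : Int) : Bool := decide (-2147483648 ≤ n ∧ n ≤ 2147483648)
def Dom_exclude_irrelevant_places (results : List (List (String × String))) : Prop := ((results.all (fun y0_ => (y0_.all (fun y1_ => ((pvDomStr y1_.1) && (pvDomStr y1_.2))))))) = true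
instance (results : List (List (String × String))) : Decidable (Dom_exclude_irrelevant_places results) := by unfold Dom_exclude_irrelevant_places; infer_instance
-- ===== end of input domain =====

-- B replaces the per-keyword 'kw in name' membership tests by a single positional scan of
-- each name (at every index, does some keyword start here?) and a comprehension-style filter
-- instead of an append loop; no speed claim.

-- ===== PORT A =====
def pvExcludeKeywordsA : List String :=
  ["surf", "school", "lessons", "shop", "gym", "restaurant", "café", "bar", "studio"]

def exclude_irrelevant_places (results : List (List (String × String))) : List (List (String × String)) :=
  results.foldl
    (fun filtered_results result =>
      let name := PySem.Str.lower (PySem.Dict.getD ⟨result⟩ "name" "")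
      if !(pvExcludeKeywordsA.any (fun keyword => PySem.Str.isIn keyword name)) then
        filtered_results ++ [result]
      else
        filtered_results)
    []

-- ===== PORT B =====
def pvExcludeKeywordsB : List String :=
  ["surf", "school", "lessons", "shop", "gym", "restaurant", "café", "bar", "studio"]

-- 'has_keyword': one left-to-right scan; at each position i, does some keyword start there?
def pvHasKeyword (name : String) : Bool :=
  (List.range name.toList.length).any (fun i =>
    pvExcludeKeywordsB.any (fun kw =>
      PySem.Str.startswith (PySem.Str.slice name (some (i : Int)) none) kw))

def exclude_irrelevant_places_alt (results : List (List (String × String))) : List (List (String × String)) :=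
  results.filter (fun r => !pvHasKeyword (PySem.Str.lower (PySem.Dict.getD ⟨r⟩ "name" "")))

-- ===== PRECONDITION & SPEC =====
def Spec_exclude_irrelevant_places (results : List (List (String × String))) (out : List (List (String × String))) : Prop := out = exclude_irrelevant_places_alt results
instance (results : List (List (String × String))) (out : List (List (String × String))) : Decidable (Spec_exclude_irrelevant_places results out) := by unfold Spec_exclude_irrelevant_places; infer_instance

-- ===== CLAIM (what is proved, stated in full; the proofs are below) =====
def Claim_equal_exclude_irrelevant_places : Prop := ∀ (results : List (List (String × String))), Dom_exclude_irrelevant_places results → Spec_exclude_irrelevant_places results (exclude_irrelevant_places results)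

-- ===== LEMMAS AND PROOFS =====

-- every keyword is a nonempty string
lemma pvKeywords_ne_nil : ∀ kw ∈ pvExcludeKeywordsA, kw.toList ≠ [] := by decide

-- A's per-name test equals B's positional scan, for any name
lemma pvAny_eq_hasKeyword (name : String) :
    pvExcludeKeywordsA.any (fun keyword => PySem.Str.isIn keyword name) = pvHasKeyword name := by
  have h : (pvExcludeKeywordsA.any (fun keyword => PySem.Str.isIn keyword name) = true)
      ↔ (pvHasKeyword name = true) := by
    unfold pvHasKeyword
    simp only [pvExcludeKeywordsB, pvExcludeKeywordsA] at *
    simp only [List.any_eq_true, PySem.Str.isIn_eq, List.mem_range,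
      PySem.Str.startswith_eq, PySem.Str.toList_slice,
      PySem.Chars.slice_eq_listSlice]
    constructor
    · rintro ⟨kw, hkw, hin⟩
      rw [← PySem.Chars.exists_prefix_drop_iff_isIn] at hin
      obtain ⟨j, hj⟩ := hin
      have hne : kw.toList ≠ [] := pvKeywords_ne_nil kw (by simpa [pvExcludeKeywordsA] using hkw)
      have hjlt : j < name.toList.length := by
        by_contra h'
        push Not at h'
        rw [List.drop_eq_nil_of_le h'] at hj
        exact hne (List.prefix_nil.mp hj)
      refine ⟨j, hjlt, kw, hkw, ?_⟩
      rw [PySem.List.slice_from_natCast, PySem.Chars.startswith_iff]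
      exact hj
    · rintro ⟨i, hi, kw, hkw, hsw⟩
      rw [PySem.List.slice_from_natCast, PySem.Chars.startswith_iff] at hsw
      refine ⟨kw, hkw, ?_⟩
      rw [← PySem.Chars.exists_prefix_drop_iff_isIn]
      exact ⟨i, hsw⟩
  cases hb : pvHasKeyword name with
  | true => exact h.mpr hb
  | false =>
    cases ha : pvExcludeKeywordsA.any (fun keyword => PySem.Str.isIn keyword name) with
    | true => rw [hb] at h; exact absurd (h.mp ha) (by simp)
    | false => rfl

-- ===== VERDICT (by name: the statement is the Claim_ definition above) =====
theorem exclude_irrelevant_places_spec : Claim_equal_exclude_irrelevant_places := by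
  intro results _
  unfold Spec_exclude_irrelevant_places exclude_irrelevant_places exclude_irrelevant_places_alt
  rw [PySem.List.foldl_append_if_eq_filter
    (p := fun result => !(pvExcludeKeywordsA.any (fun keyword =>
      PySem.Str.isIn keyword (PySem.Str.lower (PySem.Dict.getD ⟨result⟩ "name" ""))))) ]
  simp only [List.nil_append]
  exact List.filter_congr (fun r _ => by rw [pvAny_eq_hasKeyword])
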